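-- pv_equiv track=rewrite | github.com/stoyanovaantoaneta76-hash/Antoaneta-Stoyanova- | benchmarks/swe-bench/profiling/clustering/profile_model.py | calculate_cluster_stats
-- ===== SOURCE A (Python) =====
-- def calculate_cluster_stats(
--     assignments: dict[str, int], resolved: set[str]
-- ) -> dict[int, dict]:
--     """Calculate per-cluster statistics."""
--     cluster_stats = {}
--
--     for instance_id, cluster in assignments.items():
--         if cluster not in cluster_stats:
--             cluster_stats[cluster] = {"total": 0, "resolved": 0}
--         cluster_stats[cluster]["total"] += 1
--         if instance_id in resolved:
--             cluster_stats[cluster]["resolved"] += 1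
--
--     return cluster_stats
-- ===== SOURCE B (Python) =====
-- def calculate_cluster_stats(
--     assignments: dict[str, int], resolved: set[str]
-- ) -> dict[int, dict]:
--     """Calculate per-cluster statistics (index-then-assemble)."""
--     totals = {}
--     for cluster in assignments.values():
--         totals[cluster] = totals.get(cluster, 0) + 1
--     resolved_counts = {}
--     for instance_id, cluster in assignments.items():
--         if instance_id in resolved:
--             resolved_counts[cluster] = resolved_counts.get(cluster, 0) + 1
--     return {
--         c: {"total": t, "resolved": resolved_counts.get(c, 0)}
--         for c, t in totals.items()
--     }
-- ===== Notes on version B (the rewrite author's own statement) =====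
-- stated objective: idiomatic
-- what changed: Replaces A's single incremental loop that mutates nested per-cluster dicts in place by an index-then-assemble shape: one pass builds a totals counter over the cluster values, a second pass builds a resolved counter over the resolved assignments, and the result dict is assembled in one comprehension keyed off the totals counter.
import Mathlib
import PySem

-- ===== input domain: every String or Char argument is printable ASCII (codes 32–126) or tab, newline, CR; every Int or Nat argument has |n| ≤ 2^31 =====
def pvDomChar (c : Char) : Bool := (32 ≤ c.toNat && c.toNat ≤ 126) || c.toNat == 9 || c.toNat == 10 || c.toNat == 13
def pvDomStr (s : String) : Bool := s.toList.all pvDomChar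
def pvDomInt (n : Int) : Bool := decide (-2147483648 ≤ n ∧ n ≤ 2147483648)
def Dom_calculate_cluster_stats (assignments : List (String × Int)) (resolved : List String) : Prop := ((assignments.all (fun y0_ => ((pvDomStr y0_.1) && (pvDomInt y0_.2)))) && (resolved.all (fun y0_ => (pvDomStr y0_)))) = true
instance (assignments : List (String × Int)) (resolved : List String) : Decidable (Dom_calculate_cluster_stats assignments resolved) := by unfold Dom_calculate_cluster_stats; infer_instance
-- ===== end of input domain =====

-- B replaces A's single in-place nested-dict accumulation by an index-then-assemble shape
-- (two counter passes, then one assembly pass); objective: idiomatic, same cost.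


-- ===== PORT A =====
-- one loop-body iteration of A: create the {"total":0,"resolved":0} entry if missing,
-- bump "total", and bump "resolved" when the instance id is in `resolved`
def pvStepA (resolved : List String) (stats : PySem.Dict Int (PySem.Dict String Int))
    (p : String × Int) : PySem.Dict Int (PySem.Dict String Int) :=
  let stats := if stats.contains p.2 then stats
    else stats.insert p.2 (PySem.Dict.ofList [("total", (0 : Int)), ("resolved", (0 : Int))])
  let stats := stats.modify p.2 PySem.Dict.empty (fun d => d.modify "total" 0 (· + 1))
  if resolved.contains p.1 then
    stats.modify p.2 PySem.Dict.empty (fun d => d.modify "resolved" 0 (· + 1))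
  else stats

def calculate_cluster_stats (assignments : List (String × Int)) (resolved : List String) :
    List (Int × List (String × Int)) :=
  ((assignments.foldl (pvStepA resolved) PySem.Dict.empty).items.map (fun q => (q.1, q.2.items)))

-- ===== PORT B =====
def calculate_cluster_stats_alt (assignments : List (String × Int)) (resolved : List String) :
    List (Int × List (String × Int)) :=
  let totals : PySem.Dict Int Int :=
    (assignments.map Prod.snd).foldl (fun d c => d.insert c (d.getD c 0 + 1)) PySem.Dict.empty
  let resolved_counts : PySem.Dict Int Int :=
    assignments.foldl
      (fun d p => if resolved.contains p.1 then d.insert p.2 (d.getD p.2 0 + 1) else d)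
      PySem.Dict.empty
  -- the final dict comprehension is keyed off `totals`, whose keys are distinct,
  -- so its items are exactly this map over totals.items
  totals.items.map (fun p => (p.1, [("total", p.2), ("resolved", resolved_counts.getD p.1 0)]))

-- ===== PRECONDITION & SPEC =====
def Spec_calculate_cluster_stats (assignments : List (String × Int)) (resolved : List String) (out : List (Int × List (String × Int))) : Prop := out = calculate_cluster_stats_alt assignments resolved
instance (assignments : List (String × Int)) (resolved : List String) (out : List (Int × List (String × Int))) : Decidable (Spec_calculate_cluster_stats assignments resolved out) := by unfold Spec_calculate_cluster_stats; infer_instance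

-- ===== CLAIM (what is proved, stated in full; the proofs are below) =====
def Claim_equal_calculate_cluster_stats : Prop := ∀ (assignments : List (String × Int)) (resolved : List String), Dom_calculate_cluster_stats assignments resolved → Spec_calculate_cluster_stats assignments resolved (calculate_cluster_stats assignments resolved)

-- ===== LEMMAS AND PROOFS =====

-- the loop invariant: A's nested dict renders as the two counters B keeps,
-- and every cluster counted in resolved_counts has been counted in totals
def pvInv (stats : PySem.Dict Int (PySem.Dict String Int)) (totals rc : PySem.Dict Int Int) : Prop :=
  stats.items = totals.items.map
      (fun p => (p.1, (⟨[("total", p.2), ("resolved", rc.getD p.1 0)]⟩ : PySem.Dict String Int)))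
  ∧ ∀ x, rc.contains x = true → totals.contains x = true

lemma pvInner_total (t r : Int) :
    (⟨[("total", t), ("resolved", r)]⟩ : PySem.Dict String Int).modify "total" 0 (· + 1)
      = ⟨[("total", t + 1), ("resolved", r)]⟩ := rfl

lemma pvInner_resolved (t r : Int) :
    (⟨[("total", t), ("resolved", r)]⟩ : PySem.Dict String Int).modify "resolved" 0 (· + 1)
      = ⟨[("total", t), ("resolved", r + 1)]⟩ := rfl

lemma pvInv_step (resolved : List String) (p : String × Int)
    (stats : PySem.Dict Int (PySem.Dict String Int)) (totals rc : PySem.Dict Int Int)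
    (h : pvInv stats totals rc) :
    pvInv (pvStepA resolved stats p)
      (totals.insert p.2 (totals.getD p.2 0 + 1))
      (if resolved.contains p.1 then rc.insert p.2 (rc.getD p.2 0 + 1) else rc) := by
  obtain ⟨h1, h2⟩ := h
  obtain ⟨id, c⟩ := p
  simp only at *
  have hcont : stats.contains c = totals.contains c := by
    simp only [PySem.Dict.contains, h1, List.any_map]
    rfl
  -- abbreviations
  set rc' : PySem.Dict Int Int :=
    (if resolved.contains id then rc.insert c (rc.getD c 0 + 1) else rc) with hrc'
  have hrc'c : rc'.getD c 0 = rc.getD c 0 + (if resolved.contains id then 1 else 0) := by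
    rw [hrc']; split_ifs with hr
    · rw [PySem.Dict.getD_insert_self]
    · ring
  have hrc'ne : ∀ x : Int, x ≠ c → rc'.getD x 0 = rc.getD x 0 := by
    intro x hx; rw [hrc']; split_ifs with hr
    · rw [PySem.Dict.getD_insert]; simp [hx]
    · rfl
  have hC : ∀ x, rc'.contains x = true → (totals.insert c (totals.getD c 0 + 1)).contains x = true := by
    intro x hx
    rw [PySem.Dict.contains_insert]
    rw [hrc'] at hx
    split_ifs at hx with hr
    · rw [PySem.Dict.contains_insert] at hx
      rcases Bool.or_eq_true_iff.mp hx with h' | h'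
      · simp [h']
      · simp [h2 x h']
    · simp [h2 x hx]
  by_cases hc : totals.contains c = true
  · -- cluster already present: A's guard is skipped, modify replaces in place
    obtain ⟨t, ht⟩ : ∃ t, totals.get? c = some t := by
      rw [← Option.isSome_iff_exists, ← PySem.Dict.contains_eq_isSome_get?]; exact hc
    have hsg : stats.get? c =
        some (⟨[("total", t), ("resolved", rc.getD c 0)]⟩ : PySem.Dict String Int) := by
      unfold PySem.Dict.get? at ht ⊢
      rw [h1, List.find?_map]
      have hpred : ((fun (p : Int × PySem.Dict String Int) => p.1 == c) ∘
          (fun p => (p.1, (⟨[("total", p.2), ("resolved", rc.getD p.1 0)]⟩ : PySem.Dict String Int))))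
          = (fun (p : Int × Int) => p.1 == c) := funext fun p => rfl
      rw [hpred]
      obtain ⟨q', hfind', hq2'⟩ := Option.map_eq_some_iff.mp ht
      rw [hfind']
      have hq1 : q'.1 = c := by
        simpa using (List.find?_eq_some_iff_append.mp hfind').1
      simp [hq1, hq2']
    have hscont : stats.contains c = true := by rw [hcont]; exact hc
    have hgetD : stats.getD c PySem.Dict.empty =
        (⟨[("total", t), ("resolved", rc.getD c 0)]⟩ : PySem.Dict String Int) := by
      rw [PySem.Dict.getD_eq_get?_getD, hsg]; rfl
    have htD : totals.getD c 0 = t := by rw [PySem.Dict.getD_eq_get?_getD, ht]; rfl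
    -- compute A's step down to a single outer insert
    have hstep : pvStepA resolved stats (id, c) =
        stats.insert c (⟨[("total", t + 1),
          ("resolved", rc.getD c 0 + (if resolved.contains id then 1 else 0))]⟩ :
            PySem.Dict String Int) := by
      have hmod : ∀ (d : PySem.Dict Int (PySem.Dict String Int)) k g,
          d.modify k PySem.Dict.empty g = d.insert k (g (d.getD k PySem.Dict.empty)) :=
        fun _ _ _ => rfl
      unfold pvStepA
      simp only [hscont, if_true]
      simp only [hmod, hgetD, pvInner_total]
      split_ifs with hr
      · simp only [PySem.Dict.getD_eq_get?_getD, PySem.Dict.get?_insert_self,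
          Option.getD_some, pvInner_resolved, PySem.Dict.insert_insert_self]
      · simp
    refine ⟨?_, hC⟩
    rw [hstep]
    rw [PySem.Dict.items_insert_of_contains _ _ hscont,
        PySem.Dict.items_insert_of_contains _ _ hc, h1, List.map_map, List.map_map]
    apply List.map_congr_left
    intro q _
    by_cases hq : (q.1 == c) = true
    · have hq' : q.1 = c := by simpa using hq
      simp [Function.comp, hq', hrc'c, htD]
    · have hq' : q.1 ≠ c := by simpa using hq
      simp [Function.comp, hq, hrc'ne q.1 hq']
  · -- new cluster: A appends a fresh {"total":0,"resolved":0} entry, then bumps it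
    have hscont : stats.contains c = false := by rw [hcont]; simpa using hc
    have hnotin : ∀ q ∈ totals.items, (q.1 == c) = false := by
      intro q hq
      by_contra h'
      exact hc (by
        simp only [PySem.Dict.contains, List.any_eq_true]
        exact ⟨q, hq, by simpa using h'⟩)
    have hrc0 : rc.getD c 0 = 0 := by
      apply PySem.Dict.getD_of_not_contains
      by_contra h'
      exact hc (h2 c (by simpa using h'))
    have hstep : pvStepA resolved stats (id, c) =
        stats.insert c (⟨[("total", 0 + 1),
          ("resolved", 0 + (if resolved.contains id then 1 else 0))]⟩ :
            PySem.Dict String Int) := by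
      have hmod : ∀ (d : PySem.Dict Int (PySem.Dict String Int)) k g,
          d.modify k PySem.Dict.empty g = d.insert k (g (d.getD k PySem.Dict.empty)) :=
        fun _ _ _ => rfl
      have hof : (PySem.Dict.ofList [("total", (0 : Int)), ("resolved", (0 : Int))] :
          PySem.Dict String Int) = ⟨[("total", 0), ("resolved", 0)]⟩ := rfl
      unfold pvStepA
      simp only [hscont, Bool.false_eq_true, if_false]
      simp only [hof, hmod, PySem.Dict.getD_eq_get?_getD, PySem.Dict.get?_insert_self,
        Option.getD_some, pvInner_total, PySem.Dict.insert_insert_self]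
      split_ifs with hr
      · simp only [pvInner_resolved]
      · simp
    refine ⟨?_, hC⟩
    rw [hstep]
    rw [PySem.Dict.items_insert_of_not_contains _ _ hscont,
        PySem.Dict.items_insert_of_not_contains _ _ (by simpa using hc)]
    rw [PySem.Dict.getD_of_not_contains _ _ (by simpa using hc)]
    rw [h1, List.map_append]
    congr 1
    · apply List.map_congr_left
      intro q hq
      have hq' : q.1 ≠ c := by simpa using hnotin q hq
      rw [hrc'ne q.1 hq']
    · simp only [List.map_cons, List.map_nil]
      rw [hrc'c, hrc0]

lemma pvInv_foldl (resolved : List String) (l : List (String × Int)) :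
    ∀ stats totals rc, pvInv stats totals rc →
      pvInv (l.foldl (pvStepA resolved) stats)
        (l.foldl (fun d p => d.insert p.2 (d.getD p.2 0 + 1)) totals)
        (l.foldl (fun d p => if resolved.contains p.1 then d.insert p.2 (d.getD p.2 0 + 1) else d) rc) := by
  induction l with
  | nil => intro stats totals rc h; exact h
  | cons p l ih =>
      intro stats totals rc h
      exact ih _ _ _ (pvInv_step resolved p stats totals rc h)

-- ===== VERDICT (by name: the statement is the Claim_ definition above) =====
theorem calculate_cluster_stats_spec : Claim_equal_calculate_cluster_stats := by
  intro assignments resolved _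
  unfold Spec_calculate_cluster_stats calculate_cluster_stats calculate_cluster_stats_alt
  obtain ⟨h1, -⟩ := pvInv_foldl resolved assignments PySem.Dict.empty PySem.Dict.empty PySem.Dict.empty
    ⟨rfl, by intro x hx; simp [PySem.Dict.contains, PySem.Dict.empty] at hx⟩
  rw [List.foldl_map]
  rw [h1, List.map_map]
  rfl
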